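-- pv_equiv track=rewrite | github.com/crased/static_web_generator | src/get_heading_tag.py | heading_tag
-- ===== SOURCE A (Python) =====
-- def heading_tag(block):
--     line = block.split("\n")[0]
--     result = 0
--     for char in line:
--       if char == "#":
--         result += 1
--       else:
--         break
--     if result == 1:
--        return "h1"
--     if result == 2:
--        return "h2"
--     if result == 3:
--        return "h3"
--     if result == 4:
--        return "h4"
--     if result == 5:
--        return "h5"
--     if result == 6:
--        return "h6"
-- ===== SOURCE B (Python) =====
-- def heading_tag(block):
--     # Try candidate prefixes "######", "#####", ..., "#": the heading level is the
--     # unique k with "#"*k a prefix of the block but "#"*(k+1) not. No splitting is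
--     # needed: '\n' is not '#', so the first line's leading hashes are the block's.
--     for k in range(6, 0, -1):
--         if block.startswith("#" * k) and not block.startswith("#" * (k + 1)):
--             return "h" + str(k)
--     return None
-- ===== Notes on version B (the rewrite author's own statement) =====
-- stated objective: alternative
-- what changed: B replaces A's split-then-count-then-cascade (split off the first line, count leading '#' with a break loop, map the count through six ifs) with a candidate-prefix search: it tests the six fixed prefixes '#'*k from k=6 down to 1 with startswith and returns on the first exact match, never splitting the block (correct since '\n' is not '#').
import Mathlib
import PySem

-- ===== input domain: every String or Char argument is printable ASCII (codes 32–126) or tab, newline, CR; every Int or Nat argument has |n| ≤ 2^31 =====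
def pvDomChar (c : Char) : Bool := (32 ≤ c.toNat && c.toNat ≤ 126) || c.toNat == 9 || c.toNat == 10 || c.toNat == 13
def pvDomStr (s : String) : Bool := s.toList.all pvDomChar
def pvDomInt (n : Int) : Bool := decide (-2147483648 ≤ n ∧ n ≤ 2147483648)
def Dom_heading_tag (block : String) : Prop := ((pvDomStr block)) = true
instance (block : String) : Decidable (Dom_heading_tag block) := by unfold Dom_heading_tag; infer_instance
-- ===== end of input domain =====

-- B replaces A's split-then-count-then-cascade by a candidate-prefix search over the six fixed
-- prefixes "#"*6 … "#" on the unsplit block (objective: alternative).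

-- ===== PORT A =====
-- the 'for char in line: if '#': result += 1 else: break' loop
def pvALoop : List Char → Int → Int
  | [], result => result
  | c :: cs, result => if c = '#' then pvALoop cs (result + 1) else result

def heading_tag (block : String) : Option String :=
  let line := (PySem.Chars.splitOn block.toList ['\n']).getD 0 []   -- block.split("\n")[0]; split is never empty
  let result := pvALoop line 0
  if result = 1 then some "h1"
  else if result = 2 then some "h2"
  else if result = 3 then some "h3"
  else if result = 4 then some "h4"
  else if result = 5 then some "h5"
  else if result = 6 then some "h6"
  else none                                              -- Python falls through: returns None

-- ===== PORT B =====
-- the 'for k in range(6, 0, -1): if block.startswith("#"*k) and not block.startswith("#"*(k+1)): return …' loop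
def pvBLoop (cs : List Char) : List Int → Option String
  | [] => none                                           -- loop ends: return None
  | k :: ks =>
    if PySem.Chars.startswith cs (PySem.List.pyRepeat ['#'] k) = true ∧
       ¬ PySem.Chars.startswith cs (PySem.List.pyRepeat ['#'] (k + 1)) = true
    then some ("h" ++ PySem.Int.toStr k)                 -- return "h" + str(k)
    else pvBLoop cs ks

def heading_tag_alt (block : String) : Option String :=
  pvBLoop block.toList (PySem.List.pyRange 6 0 (-1))

-- ===== PRECONDITION & SPEC =====
def Spec_heading_tag (block : String) (out : Option String) : Prop := out = heading_tag_alt block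
instance (block : String) (out : Option String) : Decidable (Spec_heading_tag block out) := by unfold Spec_heading_tag; infer_instance

-- ===== CLAIM (what is proved, stated in full; the proofs are below) =====
def Claim_equal_heading_tag : Prop := ∀ (block : String), Dom_heading_tag block → Spec_heading_tag block (heading_tag block)

-- ===== LEMMAS AND PROOFS =====

-- A's break-loop counts the leading '#' prefix
theorem pvALoop_eq (cs : List Char) (r : Int) :
    pvALoop cs r = r + ((cs.takeWhile (· = '#')).length : Int) := by
  induction cs generalizing r with
  | nil => simp [pvALoop]
  | cons c cs ih =>
    by_cases h : c = '#'
    · simp [pvALoop, h, ih]; ring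
    · simp [pvALoop, h]

-- splitOn.go only ever conses to acc, then reverses it in front of the result
theorem pvGoAcc (sep : List Char) (fuel : Nat) :
    ∀ (l cur : List Char) (acc : List (List Char)),
      PySem.Chars.splitOn.go sep fuel l cur acc =
        acc.reverse ++ PySem.Chars.splitOn.go sep fuel l cur [] := by
  induction fuel with
  | zero => intro l cur acc; simp [PySem.Chars.splitOn.go]
  | succ fuel ih =>
    intro l cur acc
    match l with
    | [] => simp [PySem.Chars.splitOn.go]
    | c :: rest =>
      simp only [PySem.Chars.splitOn.go]
      split_ifs with h
      · rw [ih _ _ (cur.reverse :: acc), ih _ _ [cur.reverse]]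
        simp
      · rw [ih _ _ acc]

-- the first piece of split("\n") is the block up to the first '\n'
theorem pvGoHead (fuel : Nat) :
    ∀ (l cur : List Char), l.length ≤ fuel →
      (PySem.Chars.splitOn.go ['\n'] fuel l cur []).getD 0 [] =
        cur.reverse ++ l.takeWhile (· ≠ '\n') := by
  induction fuel with
  | zero =>
    intro l cur h
    have : l = [] := List.eq_nil_of_length_eq_zero (Nat.le_zero.mp h)
    subst this; simp [PySem.Chars.splitOn.go]
  | succ fuel ih =>
    intro l cur h
    match l with
    | [] => simp [PySem.Chars.splitOn.go]
    | c :: rest =>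
      simp only [PySem.Chars.splitOn.go]
      by_cases hc : c = '\n'
      · subst hc
        have hp : List.isPrefixOf ['\n'] ('\n' :: rest) = true := by
          simp [List.isPrefixOf]
        simp only [hp, if_true]
        rw [pvGoAcc]
        simp [List.takeWhile]
      · have hp : List.isPrefixOf ['\n'] (c :: rest) = false := by
          simp [List.isPrefixOf]; exact fun h' => (hc h'.symm).elim
        simp only [hp, Bool.false_eq_true, if_false]
        rw [ih rest (c :: cur) (by simpa using Nat.lt_succ_iff.mp (Nat.lt_of_lt_of_le (Nat.lt_succ_self _) (by simpa using h)))]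
        simp [List.takeWhile, hc]

theorem pvFirstLine (cs : List Char) :
    (PySem.Chars.splitOn cs ['\n']).getD 0 [] = cs.takeWhile (· ≠ '\n') := by
  unfold PySem.Chars.splitOn
  rw [pvGoHead (cs.length + 1) cs [] (Nat.le_succ _)]
  simp

-- counting '#' on the first line = counting '#' on the whole block ('\n' is not '#')
theorem pvTakeWhileHash (cs : List Char) :
    (cs.takeWhile (· ≠ '\n')).takeWhile (· = '#') = cs.takeWhile (· = '#') := by
  induction cs with
  | nil => rfl
  | cons c cs ih =>
    by_cases h : c = '#'
    · subst h
      simp only [List.takeWhile_cons]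
      rw [if_pos (by decide), if_pos (by decide)]
      simp only [List.takeWhile_cons]
      rw [if_pos (by decide)]
      exact congrArg ('#' :: ·) ih
    · by_cases h2 : c = '\n' <;> simp [h, h2]

-- "#"*n is a prefix of cs iff n ≤ the number of leading '#'
theorem pvReplicatePrefix (n : Nat) :
    ∀ cs : List Char,
      (List.replicate n '#' <+: cs) ↔ n ≤ (cs.takeWhile (· = '#')).length := by
  induction n with
  | zero => intro cs; simp
  | succ n ih =>
    intro cs
    match cs with
    | [] => simp [List.replicate]
    | c :: rest =>
      by_cases h : c = '#'
      · subst h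
        simp only [List.replicate, List.cons_prefix_cons, List.takeWhile_cons]
        norm_num [ih]
      · simp [List.replicate, List.cons_prefix_cons, h, Ne.symm h]

-- B's startswith test, rephrased through the leading-'#' count
theorem pvStarts (cs : List Char) (n : Nat) :
    PySem.Chars.startswith cs (List.replicate n '#') =
      decide (n ≤ (cs.takeWhile (· = '#')).length) := by
  cases hb : PySem.Chars.startswith cs (List.replicate n '#') with
  | true =>
    have h := (pvReplicatePrefix n cs).mp ((PySem.Chars.startswith_iff _ _).mp hb)
    simp [h]
  | false =>
    have h : ¬ n ≤ (cs.takeWhile (· = '#')).length := by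
      intro hle
      rw [(PySem.Chars.startswith_iff _ _).mpr ((pvReplicatePrefix n cs).mpr hle)] at hb
      cases hb
    simp [h]

-- ===== VERDICT (by name: the statement is the Claim_ definition above) =====
theorem heading_tag_spec : Claim_equal_heading_tag := by
  intro block _
  unfold Spec_heading_tag heading_tag heading_tag_alt
  rw [pvFirstLine]
  have hrange : PySem.List.pyRange 6 0 (-1) = [6, 5, 4, 3, 2, 1] := by decide
  rw [hrange]
  have hs1 : PySem.Chars.startswith block.toList ['#']
      = decide (1 ≤ (block.toList.takeWhile (· = '#')).length) := by
    simpa using pvStarts block.toList 1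
  simp only [pvALoop_eq, zero_add, pvTakeWhileHash, pvBLoop, PySem.List.pyRepeat_singleton]
  norm_num [pvStarts, hs1]
  generalize (List.takeWhile (fun x => decide (x = '#')) block.toList).length = L
  rcases Nat.lt_or_ge L 7 with hL7 | hL7
  · interval_cases L <;> decide
  · split_ifs <;> first | rfl | omega
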